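-- pv_equiv track=rewrite | github.com/afc1755/HFVL | bitFunctions.py | lbit_shift
-- ===== SOURCE A (Python) =====
-- def lbit_shift(in_bit, shift_len):
--     in_bit = in_bit.replace(' ', '')
--     first_slice = in_bit[0:shift_len]
--     second_slice = in_bit[shift_len:]
--     prelim_shift = second_slice + first_slice
--     bit_shift_out = ''
--     for i in range(0, len(prelim_shift)):
--         bit_shift_out += prelim_shift[i]
--         if (i + 1) % 8 == 0 and (i + 1) != len(in_bit):
--             bit_shift_out += ' '
--     return bit_shift_out
-- ===== SOURCE B (Python) =====
-- def lbit_shift(in_bit, shift_len):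
--     in_bit = in_bit.replace(' ', '')
--     prelim_shift = in_bit[shift_len:] + in_bit[0:shift_len]
--     blocks = [prelim_shift[i:i + 8] for i in range(0, len(prelim_shift), 8)]
--     return ' '.join(blocks)
-- ===== Notes on version B (the rewrite author's own statement) =====
-- stated objective: idiomatic
-- what changed: The per-character loop with a modulo counter and a trailing-space guard is replaced by slicing the rotated string into 8-character blocks and joining them with ' '.
import Mathlib
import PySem

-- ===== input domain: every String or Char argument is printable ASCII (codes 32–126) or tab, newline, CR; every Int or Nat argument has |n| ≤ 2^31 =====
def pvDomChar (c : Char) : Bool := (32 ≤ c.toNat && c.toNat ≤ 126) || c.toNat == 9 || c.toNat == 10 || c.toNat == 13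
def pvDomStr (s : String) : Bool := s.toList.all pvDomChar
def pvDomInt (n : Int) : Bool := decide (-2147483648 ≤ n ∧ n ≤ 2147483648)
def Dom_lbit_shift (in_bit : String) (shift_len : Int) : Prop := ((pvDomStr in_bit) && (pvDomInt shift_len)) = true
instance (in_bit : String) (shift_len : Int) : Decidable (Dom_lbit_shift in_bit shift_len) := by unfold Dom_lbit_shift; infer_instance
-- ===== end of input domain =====

-- B replaces A's per-character loop (modulo counter + trailing-space guard) by slicing the
-- rotated string into 8-character blocks and joining them with ' ' (idiomatic).

-- ===== PORT A =====
def lbit_shift (in_bit : String) (shift_len : Int) : String :=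
  let ib := PySem.Chars.replace in_bit.toList [' '] []
  let first_slice := PySem.List.slice ib (some 0) (some shift_len)
  let second_slice := PySem.List.slice ib (some shift_len) none
  let prelim_shift := second_slice ++ first_slice
  let out := (PySem.List.pyRange 0 (prelim_shift.length : Int) 1).foldl
    (fun acc i =>
      let acc2 := acc ++ [PySem.List.pyGetD prelim_shift i ' ']
      if PySem.Int.mod (i + 1) 8 == 0 && (i + 1) != (ib.length : Int) then acc2 ++ [' '] else acc2)
    ([] : List Char)
  String.ofList out

-- ===== PORT B =====
def lbit_shift_alt (in_bit : String) (shift_len : Int) : String :=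
  let ib := PySem.Chars.replace in_bit.toList [' '] []
  let prelim_shift := PySem.List.slice ib (some shift_len) none ++ PySem.List.slice ib (some 0) (some shift_len)
  let blocks := (PySem.List.pyRange 0 (prelim_shift.length : Int) 8).map
    (fun i => PySem.List.slice prelim_shift (some i) (some (i + 8)))
  String.ofList (PySem.Chars.join [' '] blocks)

-- ===== PRECONDITION & SPEC =====
def Spec_lbit_shift (in_bit : String) (shift_len : Int) (out : String) : Prop := out = lbit_shift_alt in_bit shift_len
instance (in_bit : String) (shift_len : Int) (out : String) : Decidable (Spec_lbit_shift in_bit shift_len out) := by unfold Spec_lbit_shift; infer_instance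

-- ===== CLAIM (what is proved, stated in full; the proofs are below) =====
def Claim_equal_lbit_shift : Prop := ∀ (in_bit : String) (shift_len : Int), Dom_lbit_shift in_bit shift_len → Spec_lbit_shift in_bit shift_len (lbit_shift in_bit shift_len)

-- ===== LEMMAS AND PROOFS =====

-- A's character loop, flattened: each index contributes its character plus an optional space.
def aflat (p : List Char) : List Char :=
  (List.range p.length).flatMap
    (fun k => p.getD k ' ' :: (if (k + 1) % 8 = 0 ∧ k + 1 ≠ p.length then [' '] else []))

-- B's block list in drop/take form.
def chunks8 (p : List Char) : List (List Char) :=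
  (List.range ((p.length + 7) / 8)).map (fun k => (p.drop (8 * k)).take 8)

theorem map_getD_range {α : Type} (p : List α) (d : α) :
    (List.range p.length).map (fun k => p.getD k d) = p := by
  induction p with
  | nil => simp
  | cons x t ih =>
    rw [List.length_cons, List.range_succ_eq_map, List.map_cons, List.map_map]
    simp only [Function.comp_def, List.getD_cons_zero, List.getD_cons_succ]
    rw [ih]

theorem join_cons_of_ne_nil (sep c : List Char) (cs : List (List Char)) (h : cs ≠ []) :
    PySem.Chars.join sep (c :: cs) = c ++ sep ++ PySem.Chars.join sep cs := by
  cases cs with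
  | nil => exact absurd rfl h
  | cons q rest => exact PySem.Chars.join_cons_cons sep c q rest

theorem chunks8_ne_nil (p : List Char) (h : 0 < p.length) : chunks8 p ≠ [] := by
  simp only [chunks8, ne_eq, List.map_eq_nil_iff, List.range_eq_nil]
  omega

theorem chunks8_small (p : List Char) (h1 : 0 < p.length) (h2 : p.length ≤ 8) :
    chunks8 p = [p] := by
  have hc : (p.length + 7) / 8 = 1 := by omega
  simp [chunks8, hc, List.range_one, List.take_of_length_le h2]

theorem chunks8_step (p : List Char) (h : 8 < p.length) :
    chunks8 p = p.take 8 :: chunks8 (p.drop 8) := by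
  obtain ⟨m, hm⟩ : ∃ m, p.length = 8 + m := ⟨p.length - 8, by omega⟩
  have hdl : (p.drop 8).length = m := by simp [hm]
  have hc : (p.length + 7) / 8 = (m + 7) / 8 + 1 := by omega
  rw [chunks8, chunks8, hdl, hc, List.range_succ_eq_map, List.map_cons, List.map_map]
  simp only [Nat.mul_zero, List.drop_zero]
  congr 1
  apply List.map_congr_left
  intro k _
  simp only [Function.comp]
  rw [List.drop_drop, show 8 * (k + 1) = 8 + 8 * k from by ring]

theorem take8_eq_getD (p : List Char) (h : 8 ≤ p.length) :
    p.take 8 = [p.getD 0 ' ', p.getD 1 ' ', p.getD 2 ' ', p.getD 3 ' ',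
                p.getD 4 ' ', p.getD 5 ' ', p.getD 6 ' ', p.getD 7 ' '] := by
  have hlen : (p.take 8).length = 8 := by simp; omega
  have hmap := map_getD_range (p.take 8) ' '
  rw [hlen] at hmap
  have hgd : ∀ k, k < 8 → (p.take 8).getD k ' ' = p.getD k ' ' := by
    intro k hk
    simp [List.getD, hk]
  rw [show List.range 8 = [0,1,2,3,4,5,6,7] from rfl] at hmap
  simp only [List.map_cons, List.map_nil] at hmap
  rw [← hmap, hgd 0 (by omega), hgd 1 (by omega), hgd 2 (by omega), hgd 3 (by omega),
      hgd 4 (by omega), hgd 5 (by omega), hgd 6 (by omega), hgd 7 (by omega)]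

theorem flatMap_singleton_map {α β : Type} (l : List α) (g : α → β) :
    l.flatMap (fun x => [g x]) = l.map g := by
  induction l with
  | nil => rfl
  | cons x t ih => simp only [List.flatMap_cons, List.map_cons, ih, List.singleton_append]

theorem aflat_small (p : List Char) (h : p.length ≤ 8) : aflat p = p := by
  rw [aflat]
  have hfun : ∀ k ∈ List.range p.length,
      (p.getD k ' ' :: (if (k + 1) % 8 = 0 ∧ k + 1 ≠ p.length then [' '] else []))
        = [p.getD k ' '] := by
    intro k hk
    rw [List.mem_range] at hk
    rw [if_neg (by omega)]
  calc (List.range p.length).flatMap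
        (fun k => p.getD k ' ' :: (if (k + 1) % 8 = 0 ∧ k + 1 ≠ p.length then [' '] else []))
      = (List.range p.length).flatMap (fun k => [p.getD k ' ']) := by
        rw [List.flatMap_def, List.flatMap_def, List.map_congr_left hfun]
    _ = (List.range p.length).map (fun k => p.getD k ' ') := flatMap_singleton_map _ _
    _ = p := map_getD_range p ' '

theorem aflat_step (p : List Char) (h : 8 < p.length) :
    aflat p = p.take 8 ++ ' ' :: aflat (p.drop 8) := by
  obtain ⟨m, hm⟩ : ∃ m, p.length = 8 + m := ⟨p.length - 8, by omega⟩
  have hm1 : 1 ≤ m := by omega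
  rw [aflat, hm, List.range_add, List.flatMap_append, List.flatMap_map]
  have hfirst : (List.range 8).flatMap
      (fun k => p.getD k ' ' :: (if (k + 1) % 8 = 0 ∧ k + 1 ≠ 8 + m then [' '] else []))
        = p.take 8 ++ [' '] := by
    rw [show List.range 8 = [0,1,2,3,4,5,6,7] from rfl]
    simp only [List.flatMap_cons, List.flatMap_nil, List.append_nil]
    norm_num
    rw [if_neg (show ¬ m = 0 from by omega), take8_eq_getD p (by omega)]
    simp [List.getD]
  have hdl : (p.drop 8).length = m := by simp [hm]
  have hfun : (fun a => p.getD (8 + a) ' ' ::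
        (if (8 + a + 1) % 8 = 0 ∧ 8 + a + 1 ≠ 8 + m then [' '] else []))
      = (fun k => (p.drop 8).getD k ' ' ::
        (if (k + 1) % 8 = 0 ∧ k + 1 ≠ m then [' '] else [])) := by
    funext k
    have h1 : p.getD (8 + k) ' ' = (p.drop 8).getD k ' ' := by
      simp [List.getD, List.getElem?_drop]
    have h2 : ((8 + k + 1) % 8 = 0 ∧ 8 + k + 1 ≠ 8 + m) ↔ ((k + 1) % 8 = 0 ∧ k + 1 ≠ m) := by
      omega
    rw [h1]
    simp only [h2]
  have hsecond : (List.range m).flatMap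
      (fun a => p.getD (8 + a) ' ' :: (if (8 + a + 1) % 8 = 0 ∧ 8 + a + 1 ≠ 8 + m then [' '] else []))
        = aflat (p.drop 8) := by
    rw [aflat, hdl, hfun]
  rw [hfirst, hsecond]
  simp

theorem aflat_eq_join_chunks (p : List Char) :
    aflat p = PySem.Chars.join [' '] (chunks8 p) := by
  by_cases h8 : p.length ≤ 8
  · by_cases h0 : p.length = 0
    · have : p = [] := List.length_eq_zero_iff.mp h0
      subst this
      simp [aflat, chunks8, PySem.Chars.join_nil]
    · rw [aflat_small p h8, chunks8_small p (by omega) h8, PySem.Chars.join_singleton]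
  · rw [aflat_step p (by omega), chunks8_step p (by omega),
        join_cons_of_ne_nil _ _ _ (chunks8_ne_nil _ (by simp; omega)),
        ← aflat_eq_join_chunks (p.drop 8)]
    simp
termination_by p.length
decreasing_by simp; omega

theorem portA_eq (p : List Char) (n : Nat) (hn : n = p.length) :
    ((PySem.List.pyRange 0 (p.length : Int) 1).foldl
      (fun acc i =>
        let acc2 := acc ++ [PySem.List.pyGetD p i ' ']
        if PySem.Int.mod (i + 1) 8 == 0 && (i + 1) != (n : Int) then acc2 ++ [' '] else acc2)
      ([] : List Char)) = aflat p := by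
  subst hn
  rw [PySem.List.pyRange_one]
  simp only [Int.sub_zero, Int.toNat_natCast, zero_add]
  rw [List.foldl_map]
  have hstep : (fun (acc : List Char) (k : Nat) =>
      let acc2 := acc ++ [PySem.List.pyGetD p ((k : Int)) ' ']
      if PySem.Int.mod ((k : Int) + 1) 8 == 0 && ((k : Int) + 1) != (p.length : Int)
        then acc2 ++ [' '] else acc2)
    = fun acc k => acc ++ (p.getD k ' ' :: (if (k + 1) % 8 = 0 ∧ k + 1 ≠ p.length then [' '] else [])) := by
    funext acc k
    simp only [PySem.List.pyGetD_natCast]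
    have hc : ((PySem.Int.mod ((k : Int) + 1) 8 == 0 && ((k : Int) + 1) != (p.length : Int)) = true)
        ↔ ((k + 1) % 8 = 0 ∧ k + 1 ≠ p.length) := by
      rw [PySem.Int.mod_eq_emod_of_pos (by norm_num)]
      simp only [Bool.and_eq_true, beq_iff_eq, bne_iff_ne, ne_eq]
      omega
    by_cases hcc : (k + 1) % 8 = 0 ∧ k + 1 ≠ p.length
    · rw [if_pos (hc.mpr hcc), if_pos hcc]
      simp
    · rw [if_neg (fun hb => hcc (hc.mp hb)), if_neg hcc]
  rw [hstep, PySem.List.foldl_append_eq_flatMap]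
  rw [List.nil_append, aflat]

theorem portB_eq (p : List Char) :
    ((PySem.List.pyRange 0 (p.length : Int) 8).map
      (fun i => PySem.List.slice p (some i) (some (i + 8)))) = chunks8 p := by
  rw [PySem.List.pyRange_of_pos 0 (p.length : Int) (by norm_num)]
  rw [List.map_map]
  by_cases h0 : p.length = 0
  · simp [h0, chunks8]
  · rw [if_pos (by exact_mod_cast Nat.pos_of_ne_zero h0)]
    have hcnt : (((p.length : Int) - 0 + 8 - 1) / 8).toNat = (p.length + 7) / 8 := by omega
    rw [hcnt, chunks8]
    apply List.map_congr_left
    intro k _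
    simp only [Function.comp]
    rw [show (0 + 8 * (k : Int)) = ((8 * k : Nat) : Int) from by push_cast; ring,
        show ((8 * k : Nat) : Int) + 8 = ((8 * k : Nat) : Int) + ((8 : Nat) : Int) from by norm_num,
        PySem.List.slice_natCast_add]

theorem prelim_length (ib : List Char) (s : Int) :
    (PySem.List.slice ib (some s) none ++ PySem.List.slice ib (some 0) (some s)).length
      = ib.length := by
  simp [PySem.List.slice, PySem.List.clampIdx]
  omega

-- ===== VERDICT (by name: the statement is the Claim_ definition above) =====
theorem lbit_shift_spec : Claim_equal_lbit_shift := by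
  intro in_bit shift_len _
  unfold Spec_lbit_shift lbit_shift lbit_shift_alt
  dsimp only
  rw [portA_eq _ _ (prelim_length _ _).symm, portB_eq, aflat_eq_join_chunks]
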